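-- pv_equiv track=rewrite | github.com/darshan3553/CS367_Artificial_Intelligence_Labs | Lab_01/Rabbit_leap_Dfs.py | dfs_agent
-- ===== SOURCE A (Python) =====
-- def get_successors(state):
--     successors = []
--     empty_index = state.index('_')
--
--     # Define possible moves: left (-1), right (+1), jump left (-2), jump right (+2)
--     moves = [-1, 1, -2, 2]
--
--     for move in moves:
--         new_index = empty_index + move
--         if 0 <= new_index < len(state):
--             # Create a new state by swapping the empty stone with the rabbit
--             new_state = list(state)
--             new_state[empty_index], new_state[new_index] = new_state[new_index], new_state[empty_index]
--             successors.append(tuple(new_state))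
--
--     return successors
--
-- def dfs_agent(initial_state, goal_state):
--     stack = [(initial_state, [])]
--     visited = set()
--
--     while stack:
--         state, path = stack.pop()
--
--         if state == goal_state:
--             return path + [state]
--
--         if state in visited:
--             continue
--         visited.add(state)
--
--         successors = get_successors(state)
--         for successor in successors:
--             if successor not in visited:
--                 stack.append((successor, path + [state]))
--
--     return None
-- ===== SOURCE B (Python) =====
-- def get_successors(state):
--     successors = []
--     empty_index = state.index('_')
--
--     moves = [-1, 1, -2, 2]
--
--     for move in moves:
--         new_index = empty_index + move
--         if 0 <= new_index < len(state):
--             new_state = list(state)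
--             new_state[empty_index], new_state[new_index] = new_state[new_index], new_state[empty_index]
--             successors.append(tuple(new_state))
--
--     return successors
--
--
-- def dfs_agent(initial_state, goal_state):
--     # Same LIFO traversal as a path-copying DFS, but stack entries carry only
--     # (state, parent); the path is rebuilt once, back to front, when the goal pops.
--     stack = [(initial_state, None)]
--     parent_of = {}
--
--     while stack:
--         state, parent = stack.pop()
--
--         if state == goal_state:
--             path = [state]
--             while parent is not None:
--                 path.append(parent)
--                 parent = parent_of[parent]
--             path.reverse()
--             return path
--
--         if state in parent_of:
--             continue
--         parent_of[state] = parent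
--
--         for successor in get_successors(state):
--             if successor not in parent_of:
--                 stack.append((successor, state))
--
--     return None
-- ===== Notes on version B (the rewrite author's own statement) =====
-- stated objective: alternative
-- what changed: Keeps A's LIFO traversal but replaces the path copy carried in every stack entry by a parent-pointer dict, rebuilding the returned path once, back to front, when the goal is popped.
import Mathlib
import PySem

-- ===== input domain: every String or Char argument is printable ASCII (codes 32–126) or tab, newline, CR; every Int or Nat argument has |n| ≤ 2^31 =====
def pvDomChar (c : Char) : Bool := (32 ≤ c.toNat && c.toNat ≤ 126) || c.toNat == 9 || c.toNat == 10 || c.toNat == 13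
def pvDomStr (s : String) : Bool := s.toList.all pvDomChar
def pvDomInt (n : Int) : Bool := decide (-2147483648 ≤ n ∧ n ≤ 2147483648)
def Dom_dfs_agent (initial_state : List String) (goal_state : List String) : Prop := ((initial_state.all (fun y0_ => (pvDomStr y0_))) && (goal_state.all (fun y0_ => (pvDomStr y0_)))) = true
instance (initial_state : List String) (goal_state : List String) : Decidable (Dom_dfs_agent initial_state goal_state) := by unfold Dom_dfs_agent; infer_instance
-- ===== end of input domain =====

-- B keeps A's LIFO traversal but stores only (state, parent) on the stack and rebuilds
-- the path once, back to front, from a parent-pointer dict when the goal is popped,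
-- instead of copying the whole path into every stack entry as A does.

-- ===== PORT A =====
-- shared module helper get_successors (identical in Source A and Source B)
def get_successors (state : List String) : List (List String) :=
  -- successors = []; empty_index = state.index('_')
  match PySem.List.index? state "_" with
  | none => []   -- Python raises ValueError here (no '_'); Pre_ excludes the inputs that reach it
  | some empty_index =>
    -- for move in [-1, 1, -2, 2]: ...
    [(-1 : Int), 1, -2, 2].foldl (fun successors move =>
      let new_index : Int := (empty_index : Int) + move
      if 0 ≤ new_index ∧ new_index < (state.length : Int) then
        let j := new_index.toNat   -- safe: 0 ≤ new_index was just checked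
        successors ++ [(state.set empty_index (state.getD j "")).set j (state.getD empty_index "")]
      else successors) []

-- fuel for the while-loops (totality guard only; the Python loops carry none):
-- the loop pops at most 1 + 4·(number of distinct reachable states) ≤ 1 + 4·length! entries
def pvFuel (initial_state : List String) : Nat := 4 * Nat.factorial initial_state.length + 5

-- A's while loop; the stack head is the top (list.append/pop work at the Python list's end)
def dfs_loop (goal_state : List String) :
    Nat → List (List String × List (List String)) → PySem.Set (List String) →
    Option (List (List String))
  | 0, _, _ => none                    -- fuel guard, never reached with pvFuel
  | _ + 1, [], _ => none               -- while stack: falls through → return None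
  | fuel + 1, (state, path) :: stack, visited =>
    if state = goal_state then some (path ++ [state])
    else if PySem.Set.contains visited state then dfs_loop goal_state fuel stack visited
    else
      let visited' := PySem.Set.add visited state
      let stack' := (get_successors state).foldl
        (fun st successor =>
          if PySem.Set.contains visited' successor then st
          else (successor, path ++ [state]) :: st) stack
      dfs_loop goal_state fuel stack' visited'

def dfs_agent (initial_state : List String) (goal_state : List String) : Option (List (List String)) :=
  dfs_loop goal_state (pvFuel initial_state) [(initial_state, [])] PySem.Set.empty

-- ===== PORT B =====
-- Source B's inner while loop: walk the parent chain, collecting back to front, then reverse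
def rebuild (parent_of : PySem.Dict (List String) (Option (List String))) :
    Nat → Option (List String) → List (List String) → List (List String)
  | 0, _, path => path.reverse         -- fuel guard, never reached (chain length < supplied fuel)
  | _ + 1, none, path => path.reverse  -- while parent is not None: exit → path.reverse()
  | fuel + 1, some parent, path =>
    match parent_of.get? parent with
    | some parent' => rebuild parent_of fuel parent' (path ++ [parent])
    | none => (path ++ [parent]).reverse   -- Python KeyError; unreachable from dfs_agent_alt

-- Source B's outer while loop over (state, parent) entries and the parent_of dict
def dfs_alt_loop (goal_state : List String) :
    Nat → List (List String × Option (List String)) →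
    PySem.Dict (List String) (Option (List String)) → Option (List (List String))
  | 0, _, _ => none                    -- fuel guard, never reached with pvFuel
  | _ + 1, [], _ => none               -- while stack: falls through → return None
  | fuel + 1, (state, parent) :: stack, parent_of =>
    if state = goal_state then
      some (rebuild parent_of (PySem.Dict.size parent_of + 1) parent [state])
    else if parent_of.contains state then dfs_alt_loop goal_state fuel stack parent_of
    else
      let parent_of' := parent_of.insert state parent
      let stack' := (get_successors state).foldl
        (fun st successor =>
          if parent_of'.contains successor then st
          else (successor, some state) :: st) stack
      dfs_alt_loop goal_state fuel stack' parent_of'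

def dfs_agent_alt (initial_state : List String) (goal_state : List String) : Option (List (List String)) :=
  dfs_alt_loop goal_state (pvFuel initial_state) [(initial_state, none)] PySem.Dict.empty

-- ===== PRECONDITION & SPEC =====
-- Pre_ excludes exactly the inputs on which Python A raises ValueError ('_' missing from a
-- non-goal state; every reachable state is a rearrangement of initial_state, so this is
-- decided by initial_state alone). B raises the same ValueError there.
def Pre_dfs_agent (initial_state : List String) (goal_state : List String) : Prop :=
  initial_state = goal_state ∨ "_" ∈ initial_state
instance (initial_state : List String) (goal_state : List String) : Decidable (Pre_dfs_agent initial_state goal_state) := by unfold Pre_dfs_agent; infer_instance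

def pvWitness_dfs_agent : List String × List String := (["_", "L"], ["L", "_"])

def Spec_dfs_agent (initial_state : List String) (goal_state : List String) (out : Option (List (List String))) : Prop := out = dfs_agent_alt initial_state goal_state
instance (initial_state : List String) (goal_state : List String) (out : Option (List (List String))) : Decidable (Spec_dfs_agent initial_state goal_state out) := by unfold Spec_dfs_agent; infer_instance

-- ===== CLAIM (what is proved, stated in full; the proofs are below) =====
def Claim_equal_dfs_agent : Prop := ∀ (initial_state : List String) (goal_state : List String), Dom_dfs_agent initial_state goal_state → Pre_dfs_agent initial_state goal_state → Spec_dfs_agent initial_state goal_state (dfs_agent initial_state goal_state)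

-- ===== LEMMAS AND PROOFS =====

-- `Chain d par p`: walking the parent chain of `d` from `par` yields exactly the
-- (front-to-back) path `p`; chain members are distinct keys of `d`.
inductive Chain (d : PySem.Dict (List String) (Option (List String))) :
    Option (List String) → List (List String) → Prop where
  | nil : Chain d none []
  | cons (s : List String) (par : Option (List String)) (p : List (List String)) :
      d.get? s = some par → s ∉ p → Chain d par p → Chain d (some s) (p ++ [s])

theorem chain_subset {d : PySem.Dict (List String) (Option (List String))}
    {par : Option (List String)} {p : List (List String)}
    (h : Chain d par p) : ∀ x ∈ p, x ∈ d.keys := by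
  induction h with
  | nil => intro x hx; simp at hx
  | cons s par p hget _ _ ih =>
    intro x hx
    rcases List.mem_append.1 hx with hx | hx
    · exact ih x hx
    · have hs : s ∈ d.keys := by
        by_contra hns
        rw [(PySem.Dict.get?_eq_none_iff_not_mem_keys _ _).2 hns] at hget
        simp at hget
      simpa [List.mem_singleton.1 hx] using hs

theorem chain_nodup {d : PySem.Dict (List String) (Option (List String))}
    {par : Option (List String)} {p : List (List String)}
    (h : Chain d par p) : p.Nodup := by
  induction h with
  | nil => exact List.nodup_nil
  | cons s par p _ hnot _ ih =>
    simp only [List.nodup_append]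
    exact ⟨ih, List.nodup_singleton s, by
      intro a ha b hb
      rw [List.mem_singleton.1 hb]
      exact fun e => hnot (e ▸ ha)⟩

theorem chain_mono {d : PySem.Dict (List String) (Option (List String))}
    {par : Option (List String)} {p : List (List String)} {s : List String}
    {v : Option (List String)}
    (hs : s ∉ d.keys) (h : Chain d par p) : Chain (d.insert s v) par p := by
  induction h with
  | nil => exact Chain.nil
  | cons t par p hget hnot _ ih =>
    have ht : t ∈ d.keys := by
      by_contra hnt
      rw [(PySem.Dict.get?_eq_none_iff_not_mem_keys _ _).2 hnt] at hget
      simp at hget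
    have hne : t ≠ s := fun e => hs (e ▸ ht)
    exact Chain.cons t par p (by rw [PySem.Dict.get?_insert_of_ne _ _ hne]; exact hget) hnot ih

theorem chain_length_le {d : PySem.Dict (List String) (Option (List String))}
    {par : Option (List String)} {p : List (List String)}
    (h : Chain d par p) : p.length ≤ d.keys.length := by
  have hsub : p.toFinset ⊆ d.keys.toFinset := by
    intro x hx
    exact List.mem_toFinset.2 (chain_subset h x (List.mem_toFinset.1 hx))
  calc p.length = p.toFinset.card := (List.toFinset_card_of_nodup (chain_nodup h)).symm
    _ ≤ d.keys.toFinset.card := Finset.card_le_card hsub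
    _ ≤ d.keys.length := List.toFinset_card_le d.keys

theorem rebuild_chain {d : PySem.Dict (List String) (Option (List String))}
    {par : Option (List String)} {p : List (List String)}
    (h : Chain d par p) : ∀ (f : Nat) (acc : List (List String)), p.length < f →
    rebuild d f par acc = (acc ++ p.reverse).reverse := by
  induction h with
  | nil =>
    intro f acc _
    match f with
    | 0 => simp [rebuild]
    | g + 1 => simp [rebuild]
  | cons s par p hget _ _ ih =>
    intro f acc hf
    match f, hf with
    | g + 1, hf =>
      have hlen : p.length < g := by simpa using Nat.lt_of_succ_lt_succ (by simpa using hf)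
      simp only [rebuild, hget]
      rw [ih g (acc ++ [s]) hlen]
      simp

-- entries of the two stacks aligned: same state, and the parent chain in d spells A's path
def EntRel (d : PySem.Dict (List String) (Option (List String)))
    (a : List String × List (List String)) (b : List String × Option (List String)) : Prop :=
  a.1 = b.1 ∧ Chain d b.2 a.2

theorem entrel_mono {d : PySem.Dict (List String) (Option (List String))}
    {s : List String} {v : Option (List String)} (hs : s ∉ d.keys)
    {a : List String × List (List String)} {b : List String × Option (List String)}
    (h : EntRel d a b) : EntRel (d.insert s v) a b :=
  ⟨h.1, chain_mono hs h.2⟩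

-- pushing the successors preserves the alignment (both sides test the same membership)
theorem fold_rel (d : PySem.Dict (List String) (Option (List String)))
    (s : List String) (p : List (List String))
    (hchain : Chain d (some s) (p ++ [s])) :
    ∀ (succs : List (List String))
      (stA : List (List String × List (List String)))
      (stB : List (List String × Option (List String))),
      List.Forall₂ (EntRel d) stA stB →
      List.Forall₂ (EntRel d)
        (succs.foldl (fun st successor =>
          if PySem.Set.contains d.keys successor then st
          else (successor, p ++ [s]) :: st) stA)
        (succs.foldl (fun st successor =>
          if d.contains successor then st
          else (successor, some s) :: st) stB) := by
  intro succs
  induction succs with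
  | nil => intro stA stB h; exact h
  | cons succ rest ih =>
    intro stA stB h
    simp only [List.foldl_cons]
    have hcond : PySem.Set.contains d.keys succ = d.contains succ := by
      by_cases hm : succ ∈ d.keys
      · rw [(PySem.Set.contains_iff _ _).2 hm, (PySem.Dict.contains_iff_mem_keys _ _).2 hm]
      · rw [(Bool.eq_false_iff).2 (fun hc => hm ((PySem.Set.contains_iff _ _).1 hc)),
            (Bool.eq_false_iff).2 (fun hc => hm ((PySem.Dict.contains_iff_mem_keys _ _).1 hc))]
    rw [hcond]
    by_cases hc : d.contains succ = true
    · rw [if_pos hc, if_pos hc]; exact ih stA stB h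
    · rw [if_neg hc, if_neg hc]
      exact ih _ _ (List.Forall₂.cons ⟨rfl, hchain⟩ h)

-- the two while loops agree whenever the stacks are aligned and visited = parent_of.keys
theorem loop_eq (goal_state : List String) :
    ∀ (fuel : Nat) (stA : List (List String × List (List String)))
      (stB : List (List String × Option (List String)))
      (d : PySem.Dict (List String) (Option (List String))),
      List.Forall₂ (EntRel d) stA stB → d.keys.Nodup →
      dfs_loop goal_state fuel stA d.keys = dfs_alt_loop goal_state fuel stB d := by
  intro fuel
  induction fuel with
  | zero => intro stA stB d _ _; rfl
  | succ fuel ih =>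
    intro stA stB d hrel hnd
    cases hrel with
    | nil => rfl
    | cons hab hrest =>
      rename_i a b stA' stB'
      obtain ⟨s, p⟩ := a
      obtain ⟨s', par⟩ := b
      obtain ⟨hs, hchain⟩ := hab
      cases hs
      simp only [dfs_loop, dfs_alt_loop]
      by_cases hgoal : s = goal_state
      · rw [if_pos hgoal, if_pos hgoal]
        have hlt : p.length < PySem.Dict.size d + 1 := by
          have h1 : p.length ≤ d.keys.length := chain_length_le hchain
          have h2 : d.keys.length = PySem.Dict.size d := by
            simp [PySem.Dict.keys, PySem.Dict.size]
          omega
        rw [rebuild_chain hchain _ [s] hlt]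
        simp
      · rw [if_neg hgoal, if_neg hgoal]
        have hcond : PySem.Set.contains d.keys s = d.contains s := by
          by_cases hm : s ∈ d.keys
          · rw [(PySem.Set.contains_iff _ _).2 hm, (PySem.Dict.contains_iff_mem_keys _ _).2 hm]
          · rw [(Bool.eq_false_iff).2 (fun hc => hm ((PySem.Set.contains_iff _ _).1 hc)),
                (Bool.eq_false_iff).2 (fun hc => hm ((PySem.Dict.contains_iff_mem_keys _ _).1 hc))]
        rw [hcond]
        by_cases hvis : d.contains s = true
        · rw [if_pos hvis, if_pos hvis]
          exact ih stA' stB' d hrest hnd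
        · rw [if_neg hvis, if_neg hvis]
          have hsnot : s ∉ d.keys := fun hm => hvis ((PySem.Dict.contains_iff_mem_keys _ _).2 hm)
          have hkeys' : (d.insert s par).keys = d.keys ++ [s] :=
            PySem.Dict.keys_insert_of_not_contains _ _ (Bool.eq_false_iff.2 hvis)
          have hadd : PySem.Set.add d.keys s = d.keys ++ [s] :=
            PySem.Set.add_of_not_mem hsnot
          have hnd' : (d.insert s par).keys.Nodup := by
            rw [hkeys', List.nodup_append]
            exact ⟨hnd, List.nodup_singleton s, by
              intro a ha b hb
              rw [List.mem_singleton.1 hb]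
              exact fun e => hsnot (e ▸ ha)⟩
          have hchain' : Chain (d.insert s par) (some s) (p ++ [s]) := by
            refine Chain.cons s par p (PySem.Dict.get?_insert_self _ _ _) ?_
              (chain_mono hsnot hchain)
            exact fun hm => hsnot (chain_subset hchain s hm)
          have hrest' : List.Forall₂ (EntRel (d.insert s par)) stA' stB' :=
            List.Forall₂.imp (fun a b h => entrel_mono hsnot h) hrest
          have hfold := fold_rel (d.insert s par) s p hchain' (get_successors s) stA' stB' hrest'
          have := ih _ _ (d.insert s par) hfold hnd'
          rw [hadd, ← hkeys']
          exact this

-- ===== VERDICT (by name: the statement is the Claim_ definition above) =====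
theorem dfs_agent_spec : Claim_equal_dfs_agent := by
  intro initial_state goal_state _ _
  unfold Spec_dfs_agent dfs_agent dfs_agent_alt
  have h : PySem.Dict.keys (PySem.Dict.empty : PySem.Dict (List String) (Option (List String))) = PySem.Set.empty := by
    simp [PySem.Dict.keys_empty, PySem.Set.empty]
  rw [← h]
  exact loop_eq goal_state (pvFuel initial_state)
    [(initial_state, [])] [(initial_state, none)] PySem.Dict.empty
    (List.Forall₂.cons ⟨rfl, Chain.nil⟩ List.Forall₂.nil)
    (by simp [PySem.Dict.keys_empty])
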